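-- pv_equiv track=rewrite | github.com/taako2/the-fuck-pile | club_functions.py | get_last_to_first
-- ===== SOURCE A (Python) =====
-- def get_last_to_first(
--     person_to_friends: dict[str, list[str]]) -> dict[str, list[str]]:
--     """Return a "last name to first name(s)" dictionary with the people from
-- 	    the
-- 	"person to friends" dictionary person_to_friends.
--
-- 	>>> get_last_to_first(P2F) == {
-- 	...    'Katsopolis': ['Jesse'],
-- 	...    'Tanner': ['Danny R', 'Michelle', 'Stephanie J'],
-- 	...    'Gladstone': ['Joey'],
-- 	...    'Donaldson-Katsopolis': ['Rebecca'],
-- 	...    'Gibbler': ['Kimmy'],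
-- 	...    'Tanner-Fuller': ['DJ']}
-- 	True
-- 	"""
--
--     last_to_first = {}
--     for person, friends in person_to_friends.items():
--         name_parts = person.rsplit(" ", 1)
--         last = name_parts[-1]
--         first = name_parts[0]
--         if last in last_to_first:
--             if first not in last_to_first[last]:
--                 last_to_first[last].append(first)
--         else:
--             last_to_first[last] = [first]
--         for friend in friends:
--             name_parts = friend.rsplit(" ", 1)
--             last = name_parts[-1]
--             first = name_parts[0]
--             if last in last_to_first:
--                 if first not in last_to_first[last]:
--                     last_to_first[last].append(first)
--             else:
--                 last_to_first[last] = [first]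
--     return last_to_first
-- ===== SOURCE B (Python) =====
-- def get_last_to_first(
--     person_to_friends: dict[str, list[str]]) -> dict[str, list[str]]:
--     # Three-stage pipeline: flatten every name to a (last, first) pair, dedup
--     # the WHOLE pair stream once (order-preserving), then group with a blind
--     # append -- no per-bucket membership test is ever needed, because after
--     # the global dedup each (last, first) combination occurs exactly once.
--     pairs = []
--     for person, friends in person_to_friends.items():
--         for name in (person, *friends):
--             parts = name.rsplit(" ", 1)
--             pairs.append((parts[-1], parts[0]))
--     result = {}
--     for last, first in dict.fromkeys(pairs):
--         result.setdefault(last, []).append(first)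
--     return result
-- ===== Notes on version B (the rewrite author's own statement) =====
-- stated objective: alternative
-- what changed: A builds the dict in one interleaved pass with a membership scan of the bucket before every insert; B flattens to a (last, first) pair list, dedups the whole pair stream once with dict.fromkeys, and then groups by a blind setdefault-append with no membership tests at all.
import Mathlib
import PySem

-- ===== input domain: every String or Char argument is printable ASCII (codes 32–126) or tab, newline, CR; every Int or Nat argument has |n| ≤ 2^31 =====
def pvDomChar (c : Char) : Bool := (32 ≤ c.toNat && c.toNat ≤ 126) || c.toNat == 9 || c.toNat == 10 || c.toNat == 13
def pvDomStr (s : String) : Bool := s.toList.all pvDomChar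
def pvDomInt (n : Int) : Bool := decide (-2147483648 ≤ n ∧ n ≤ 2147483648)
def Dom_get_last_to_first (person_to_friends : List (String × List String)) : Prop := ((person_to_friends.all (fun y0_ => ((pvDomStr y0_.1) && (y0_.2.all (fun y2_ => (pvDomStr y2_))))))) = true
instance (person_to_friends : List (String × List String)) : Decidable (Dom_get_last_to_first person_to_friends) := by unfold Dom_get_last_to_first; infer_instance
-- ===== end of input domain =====

-- B replaces A's single interleaved build-with-dedup pass by a three-stage
-- pipeline: flatten to (last, first) pairs, dedup the whole pair stream once,
-- then group by a blind append with no per-bucket membership tests.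

-- shared parse helper: name.rsplit(" ", 1) giving (last, first);
-- exact for rsplit with maxsplit 1: splits at the LAST space, or no split if none.
def pvRsplitLast : List Char → Option (List Char × List Char)
  | [] => none
  | c :: cs =>
      match pvRsplitLast cs with
      | some (a, b) => some (c :: a, b)
      | none => if c = ' ' then some ([], cs) else none

-- returns (last, first) as in both Pythons (parts[-1], parts[0])
def pvParseName (s : String) : String × String :=
  match pvRsplitLast s.toList with
  | some (a, b) => (String.ofList b, String.ofList a)
  | none => (s, s)

-- ===== PORT A =====
-- A's insertion: if last is a key, append first when absent; else new entry at end.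
def pvInsertA (d : List (String × List String)) (last first : String) : List (String × List String) :=
  match d with
  | [] => [(last, [first])]
  | (k, v) :: rest =>
      if k = last then (k, if first ∈ v then v else v ++ [first]) :: rest
      else (k, v) :: pvInsertA rest last first

def pvStepA (d : List (String × List String)) (name : String) : List (String × List String) :=
  let p := pvParseName name
  pvInsertA d p.1 p.2

def get_last_to_first (person_to_friends : List (String × List String)) : List (String × List String) :=
  person_to_friends.foldl
    (fun d pf => pf.2.foldl pvStepA (pvStepA d pf.1)) []

-- ===== PORT B =====
-- phase 1: flatten to (last, first) pairs
def pvPairs (person_to_friends : List (String × List String)) : List (String × String) :=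
  person_to_friends.foldl
    (fun ps pf => (pf.1 :: pf.2).foldl (fun ps n => ps ++ [pvParseName n]) ps) []

-- phase 3's blind grouping step: result.setdefault(last, []).append(first)
def pvAppendB (d : List (String × List String)) (last first : String) : List (String × List String) :=
  match d with
  | [] => [(last, [first])]
  | (k, v) :: rest =>
      if k = last then (k, v ++ [first]) :: rest
      else (k, v) :: pvAppendB rest last first

-- phase 2: dict.fromkeys(pairs) = PySem.List.dedup; phase 3: blind grouping fold
def get_last_to_first_alt (person_to_friends : List (String × List String)) : List (String × List String) :=
  (PySem.List.dedup (pvPairs person_to_friends)).foldl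
    (fun d p => pvAppendB d p.1 p.2) []

-- ===== PRECONDITION & SPEC =====
def Spec_get_last_to_first (person_to_friends : List (String × List String)) (out : List (String × List String)) : Prop := out = get_last_to_first_alt person_to_friends
instance (person_to_friends : List (String × List String)) (out : List (String × List String)) : Decidable (Spec_get_last_to_first person_to_friends out) := by unfold Spec_get_last_to_first; infer_instance

-- ===== CLAIM (what is proved, stated in full; the proofs are below) =====
def Claim_equal_get_last_to_first : Prop := ∀ (person_to_friends : List (String × List String)), Dom_get_last_to_first person_to_friends → Spec_get_last_to_first person_to_friends (get_last_to_first person_to_friends)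

-- ===== LEMMAS AND PROOFS =====
def pvStepP (d : List (String × List String)) (p : String × String) : List (String × List String) :=
  pvInsertA d p.1 p.2

-- A's fold result from a pair list
def pvF (ps : List (String × String)) : List (String × List String) :=
  ps.foldl pvStepP []

-- B's blind grouping fold from a pair list
def pvGroup (ps : List (String × String)) : List (String × List String) :=
  ps.foldl (fun d p => pvAppendB d p.1 p.2) []

-- lookup of a key's bucket ([] when absent)
def pvGet (d : List (String × List String)) (l : String) : List String :=
  match d with
  | [] => []
  | (k, v) :: rest => if k = l then v else pvGet rest l

theorem pvStepA_eq (d : List (String × List String)) (n : String) :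
    pvStepA d n = pvStepP d (pvParseName n) := rfl

theorem pvFold_names (names : List String) (d : List (String × List String)) :
    names.foldl pvStepA d = (names.map pvParseName).foldl pvStepP d := by
  induction names generalizing d with
  | nil => rfl
  | cons n ns ih => simp [List.foldl_cons, pvStepA_eq, ih]

theorem pvPairsFold_names (names : List String) (ps : List (String × String)) :
    names.foldl (fun ps n => ps ++ [pvParseName n]) ps = ps ++ names.map pvParseName := by
  induction names generalizing ps with
  | nil => simp
  | cons n ns ih => simp [List.foldl_cons, ih]

theorem pvOuter_eq_F (l : List (String × List String)) (ps : List (String × String)) :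
    l.foldl (fun d pf => pf.2.foldl pvStepA (pvStepA d pf.1)) (pvF ps)
      = pvF (l.foldl (fun ps pf => (pf.1 :: pf.2).foldl (fun ps n => ps ++ [pvParseName n]) ps) ps) := by
  induction l generalizing ps with
  | nil => rfl
  | cons pf rest ih =>
      rw [List.foldl_cons, List.foldl_cons]
      rw [pvStepA_eq, pvFold_names, pvPairsFold_names]
      have : pvStepP (pvF ps) (pvParseName pf.1) = pvF (ps ++ [pvParseName pf.1]) := by
        simp [pvF, List.foldl_append]
      rw [this]
      have h2 : (pf.2.map pvParseName).foldl pvStepP (pvF (ps ++ [pvParseName pf.1]))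
          = pvF ((ps ++ [pvParseName pf.1]) ++ pf.2.map pvParseName) := by
        simp [pvF, List.foldl_append]
      rw [h2, ih]
      simp [List.map_cons]

theorem pvOfList_concat {α : Type} [DecidableEq α] [BEq α] [LawfulBEq α] (xs : List α) (x : α) :
    PySem.Set.ofList (xs ++ [x])
      = if x ∈ PySem.Set.ofList xs then PySem.Set.ofList xs else PySem.Set.ofList xs ++ [x] := by
  rw [PySem.Set.ofList_eq_foldl, PySem.Set.ofList_eq_foldl, List.foldl_append,
      List.foldl_cons, List.foldl_nil]
  simp [PySem.Set.add, PySem.Set.contains]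

-- A's insertion, characterised by the bucket lookup
theorem pvInsertA_char (d : List (String × List String)) (l f : String) :
    pvInsertA d l f = if f ∈ pvGet d l then d else pvAppendB d l f := by
  induction d with
  | nil => simp [pvInsertA, pvGet, pvAppendB]
  | cons kv rest ih =>
      obtain ⟨k, v⟩ := kv
      by_cases h : k = l
      · subst h
        simp only [pvInsertA, pvGet, pvAppendB]
        split_ifs <;> rfl
      · simp only [pvInsertA, pvGet, pvAppendB, if_neg h, ih]
        split_ifs with hf
        · rfl
        · rfl

theorem pvGet_appendB_same (d : List (String × List String)) (l f : String) :
    pvGet (pvAppendB d l f) l = pvGet d l ++ [f] := by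
  induction d with
  | nil => simp [pvAppendB, pvGet]
  | cons kv rest ih =>
      obtain ⟨k, v⟩ := kv
      by_cases h : k = l
      · subst h; simp [pvAppendB, pvGet]
      · simp [pvAppendB, pvGet, h, ih]

theorem pvGet_appendB_other (d : List (String × List String)) (l l' f : String) (h : l' ≠ l) :
    pvGet (pvAppendB d l' f) l = pvGet d l := by
  induction d with
  | nil => simp [pvAppendB, pvGet, h]
  | cons kv rest ih =>
      obtain ⟨k, v⟩ := kv
      by_cases hk : k = l'
      · subst hk; simp [pvAppendB, pvGet, h]
      · simp only [pvAppendB, if_neg hk, pvGet]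
        split_ifs with h2
        · rfl
        · exact ih

-- membership in a bucket of the blind grouping = membership of the pair in the list
theorem pvGet_group_mem (ps : List (String × String)) (l f : String) :
    f ∈ pvGet (pvGroup ps) l ↔ (l, f) ∈ ps := by
  induction ps using List.reverseRecOn with
  | nil => simp [pvGroup, pvGet]
  | append_singleton ps p ih =>
      obtain ⟨l', f'⟩ := p
      have hg : pvGroup (ps ++ [(l', f')]) = pvAppendB (pvGroup ps) l' f' := by
        simp [pvGroup, List.foldl_append]
      rw [hg]
      by_cases h : l' = l
      · subst h
        rw [pvGet_appendB_same]
        simp [ih]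
      · rw [pvGet_appendB_other _ _ _ _ h]
        simp [ih, Ne.symm h]

-- MAIN: A's interleaved fold = blind grouping of the globally deduped pair list
theorem pvF_eq_group_dedup (ps : List (String × String)) :
    pvF ps = pvGroup (PySem.List.dedup ps) := by
  induction ps using List.reverseRecOn with
  | nil => rfl
  | append_singleton ps p ih =>
      obtain ⟨l, f⟩ := p
      have hF : pvF (ps ++ [(l, f)]) = pvInsertA (pvF ps) l f := by
        simp [pvF, List.foldl_append, pvStepP]
      rw [hF, ih, pvInsertA_char]
      have hmemiff : f ∈ pvGet (pvGroup (PySem.List.dedup ps)) l ↔ (l, f) ∈ ps := by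
        rw [pvGet_group_mem, PySem.List.mem_dedup]
      by_cases hmem : (l, f) ∈ ps
      · rw [if_pos (hmemiff.mpr hmem)]
        have : PySem.List.dedup (ps ++ [(l, f)]) = PySem.List.dedup ps := by
          simp only [PySem.List.dedup_eq_ofList]
          rw [pvOfList_concat, if_pos (by simpa [PySem.Set.mem_ofList] using hmem)]
        rw [this]
      · rw [if_neg (fun h => hmem (hmemiff.mp h))]
        have : PySem.List.dedup (ps ++ [(l, f)]) = PySem.List.dedup ps ++ [(l, f)] := by
          simp only [PySem.List.dedup_eq_ofList]
          rw [pvOfList_concat, if_neg (by simpa [PySem.Set.mem_ofList] using hmem)]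
        rw [this]
        simp [pvGroup, List.foldl_append]

-- ===== VERDICT (by name: the statement is the Claim_ definition above) =====
theorem get_last_to_first_spec : Claim_equal_get_last_to_first := by
  intro ptf _
  show get_last_to_first ptf = get_last_to_first_alt ptf
  have h1 : get_last_to_first ptf = pvF (pvPairs ptf) := pvOuter_eq_F ptf []
  have h2 : get_last_to_first_alt ptf = pvGroup (PySem.List.dedup (pvPairs ptf)) := rfl
  rw [h1, h2, pvF_eq_group_dedup]
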